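-- pv_equiv track=rewrite | github.com/sidhikabalachandar/lig_clash_score | src/sample/systematic_decoy_search.py | get_grid_groups
-- ===== SOURCE A (Python) =====
-- def get_grid_groups(grid_size, n):
--     grid = []
--     for dx in range(-grid_size, grid_size + 1):
--         for dy in range(-grid_size, grid_size + 1):
--             for dz in range(-grid_size, grid_size + 1):
--                 grid.append([dx, dy, dz])
--
--     grouped_files = []
--
--     for i in range(0, len(grid), n):
--         grouped_files += [grid[i: i + n]]
--
--     return grouped_files
-- ===== SOURCE B (Python) =====
-- def get_grid_groups(grid_size, n):
--     side = 2 * grid_size + 1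
--     total = side ** 3 if side > 0 else 0
--
--     def point(i):
--         return [i // (side * side) - grid_size,
--                 (i // side) % side - grid_size,
--                 i % side - grid_size]
--
--     return [[point(j) for j in range(i, min(i + n, total))]
--             for i in range(0, total, n)]
-- ===== Notes on version B (the rewrite author's own statement) =====
-- stated objective: alternative
-- what changed: B replaces A's build-the-whole-grid-with-three-nested-loops-then-slice-it-into-chunks by a single pass that decodes each flat index i into (dx,dy,dz) with //,% arithmetic and emits each chunk directly as an index range, never materialising the full grid.
import Mathlib
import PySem

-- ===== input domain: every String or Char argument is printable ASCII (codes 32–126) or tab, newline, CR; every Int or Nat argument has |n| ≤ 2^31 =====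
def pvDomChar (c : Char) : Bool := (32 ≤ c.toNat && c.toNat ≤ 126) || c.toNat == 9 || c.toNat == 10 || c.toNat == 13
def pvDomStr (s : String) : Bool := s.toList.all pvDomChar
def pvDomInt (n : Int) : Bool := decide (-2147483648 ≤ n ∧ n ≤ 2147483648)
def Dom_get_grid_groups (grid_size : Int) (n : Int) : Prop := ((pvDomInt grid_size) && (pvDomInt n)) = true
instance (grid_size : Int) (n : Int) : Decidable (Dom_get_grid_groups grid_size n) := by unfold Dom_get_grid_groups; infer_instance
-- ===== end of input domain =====

-- B fuses grid construction and chunking into one pass of flat-index arithmetic (decoding an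
-- index into (dx,dy,dz)) instead of materialising the full grid list and then slicing it.

-- ===== PORT A =====
-- Python lists are dynamic arrays: `grid.append(x)` is `Array.push`, and the slice
-- `grid[i : i+n]` is `Array.extract` of the PySem-clamped bounds (exact: `pv_extract_eq_slice`
-- below proves it equal to `PySem.List.slice` on the underlying list, for every i, n).
def get_grid_groups (grid_size : Int) (n : Int) : List (List (List Int)) :=
  let grid : Array (List Int) :=
    (PySem.List.pyRange (-grid_size) (grid_size + 1) 1).foldl (fun grid dx =>
      (PySem.List.pyRange (-grid_size) (grid_size + 1) 1).foldl (fun grid dy =>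
        (PySem.List.pyRange (-grid_size) (grid_size + 1) 1).foldl (fun grid dz =>
          grid.push [dx, dy, dz]) grid) grid) #[]
  ((PySem.List.pyRange 0 (grid.size : Int) n).foldl
    (fun acc i => acc.push (grid.extract (PySem.List.clampIdx grid.size i)
      (PySem.List.clampIdx grid.size (i + n))).toList) #[]).toList

-- ===== PORT B =====
-- Python B's inner function `point` (closes over grid_size and side)
def pvPointB (grid_size : Int) (side : Int) (i : Int) : List Int :=
  [PySem.Int.floordiv i (side * side) - grid_size,
   PySem.Int.mod (PySem.Int.floordiv i side) side - grid_size,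
   PySem.Int.mod i side - grid_size]

def get_grid_groups_alt (grid_size : Int) (n : Int) : List (List (List Int)) :=
  let side := 2 * grid_size + 1
  let total := if side > 0 then side ^ 3 else 0
  (PySem.List.pyRange 0 total n).map (fun i =>
    (PySem.List.pyRange i (min (i + n) total) 1).map (pvPointB grid_size side))

-- ===== PRECONDITION & SPEC =====
-- Pre_ excludes exactly n = 0, where Python A raises ValueError (range() arg 3 must not be zero).
def Pre_get_grid_groups (grid_size : Int) (n : Int) : Prop := n ≠ 0
instance (grid_size : Int) (n : Int) : Decidable (Pre_get_grid_groups grid_size n) := by unfold Pre_get_grid_groups; infer_instance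
def pvWitness_get_grid_groups : Int × Int := (1, 2)

def Spec_get_grid_groups (grid_size : Int) (n : Int) (out : List (List (List Int))) : Prop := out = get_grid_groups_alt grid_size n
instance (grid_size : Int) (n : Int) (out : List (List (List Int))) : Decidable (Spec_get_grid_groups grid_size n out) := by unfold Spec_get_grid_groups; infer_instance

-- ===== CLAIM (what is proved, stated in full; the proofs are below) =====
def Claim_equal_get_grid_groups : Prop := ∀ (grid_size : Int) (n : Int), Dom_get_grid_groups grid_size n → Pre_get_grid_groups grid_size n → Spec_get_grid_groups grid_size n (get_grid_groups grid_size n)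

-- ===== LEMMAS AND PROOFS =====

-- side length as a Nat, and the flat-index decode of a grid point, in Nat arithmetic
def pvS (g : Int) : Nat := (2 * g + 1).toNat
def pvDec (g : Int) (i : Nat) : List Int :=
  [(↑(i / (pvS g * pvS g)) : Int) - g, (↑(i / pvS g % pvS g) : Int) - g, (↑(i % pvS g) : Int) - g]

-- a range of m*s flat indices, decoded by /s and %s, is the nested double loop
lemma pv_range_mul_flatMap {α : Type} (m s : Nat) (f : Nat → Nat → α) :
    (List.range (m * s)).map (fun i => f (i / s) (i % s)) =
    (List.range m).flatMap (fun x => (List.range s).map (fun y => f x y)) := by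
  induction m with
  | zero => simp
  | succ m ih =>
    rw [Nat.succ_mul, List.range_add, List.map_append, ih, List.range_succ,
        List.flatMap_append, List.flatMap_singleton, List.map_map]
    congr 1
    rcases Nat.eq_zero_or_pos s with hs | hs
    · subst hs; simp
    · apply List.map_congr_left
      intro y hy
      rw [List.mem_range] at hy
      have he : m * s + y = y + s * m := by ring
      simp only [Function.comp, he, Nat.add_mul_div_left _ _ hs, Nat.add_mul_mod_self_left,
        Nat.div_eq_of_lt hy, Nat.mod_eq_of_lt hy, Nat.zero_add]

-- A's triple nested loop builds exactly the decoded flat-index range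
lemma pv_grid_eq (g : Int) :
    (PySem.List.pyRange (-g) (g + 1) 1).foldl (fun grid dx =>
      (PySem.List.pyRange (-g) (g + 1) 1).foldl (fun grid dy =>
        (PySem.List.pyRange (-g) (g + 1) 1).foldl (fun grid dz =>
          grid ++ [[dx, dy, dz]]) grid) grid) ([] : List (List Int)) =
    (List.range (pvS g * pvS g * pvS g)).map (pvDec g) := by
  have hR : PySem.List.pyRange (-g) (g + 1) 1 = (List.range (pvS g)).map (fun (k : Nat) => -g + (k : Int)) := by
    rw [PySem.List.pyRange_one, show (g + 1 - -g).toNat = pvS g from by unfold pvS; omega]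
  simp only [PySem.List.foldl_append_singleton_eq_map, PySem.List.foldl_append_eq_flatMap,
    List.nil_append, hR, List.flatMap_map, List.map_map, Function.comp_def]
  have hinner : ∀ x : Nat,
      (List.range (pvS g)).flatMap (fun (y : Nat) => (List.range (pvS g)).map
        (fun (z : Nat) => [-g + (x:Int), -g + (y:Int), -g + (z:Int)]))
      = (List.range (pvS g * pvS g)).map
          (fun r => [-g + (x:Int), -g + ((r / pvS g : Nat):Int), -g + ((r % pvS g : Nat):Int)]) := by
    intro x
    rw [pv_range_mul_flatMap (pvS g) (pvS g)
        (fun y z => [-g + (x:Int), -g + (y:Int), -g + (z:Int)])]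
  simp only [hinner]
  rw [← pv_range_mul_flatMap (pvS g) (pvS g * pvS g)
      (fun x r => [-g + (x:Int), -g + ((r / pvS g : Nat):Int), -g + ((r % pvS g : Nat):Int)])]
  rw [show pvS g * pvS g * pvS g = pvS g * (pvS g * pvS g) by ring]
  apply List.map_congr_left
  intro i _
  simp only [pvDec, Nat.mod_mul_right_div_self, Nat.mod_mod_of_dvd i ⟨pvS g, rfl⟩]
  norm_num
  refine ⟨by omega, by omega, by omega⟩

-- on a nonnegative flat index the Nat decode is B's Int `point`
lemma pv_dec_eq_point (g : Int) (hg : 0 < 2 * g + 1) (i : Nat) :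
    pvDec g i = pvPointB g (2 * g + 1) (↑i) := by
  have hs : (2 * g + 1) = ((pvS g : Nat) : Int) := by unfold pvS; omega
  rw [pvDec, pvPointB, hs]
  rw [show ((pvS g : Nat) : Int) * ((pvS g : Nat) : Int) = ((pvS g * pvS g : Nat) : Int) by push_cast; ring]
  rw [PySem.Int.floordiv_natCast, PySem.Int.floordiv_natCast, PySem.Int.mod_natCast, PySem.Int.mod_natCast]

-- range(0, T, n) with n < 0 and T ≥ 0 is empty
lemma pv_pyRange_neg_empty (T : Nat) (n : Int) (hn : n < 0) :
    PySem.List.pyRange 0 (↑T) n = [] := by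
  have h1 : ¬ (0:Int) < n := by omega
  have h2 : ¬ ((T:Int) < 0) := by omega
  simp [PySem.List.pyRange, h1, h2]

-- one chunk: a slice of the decoded grid is B's mapped index range
lemma pv_chunk_eq (g n i : Int) (T : Nat) (hT : T = pvS g * pvS g * pvS g)
    (hn : 0 < n) (h0 : 0 ≤ i) (hi : i < (T : Int)) :
    PySem.List.slice ((List.range T).map (pvDec g)) (some i) (some (i + n)) =
    (PySem.List.pyRange i (min (i + n) (T : Int)) 1).map (pvPointB g (2 * g + 1)) := by
  have hSpos : 0 < pvS g := by
    by_contra h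
    have h0' : pvS g = 0 := by omega
    have hT0 : T = 0 := by rw [hT, h0']
    omega
  have hg : 0 < 2 * g + 1 := by unfold pvS at hSpos; omega
  rw [PySem.List.slice_toNat _ h0 (by omega)]
  apply List.ext_getElem
  · simp [PySem.List.length_pyRange_one]
    omega
  · intro k h1 h2
    simp only [List.getElem_take, List.getElem_drop, List.getElem_map,
      List.getElem_range, PySem.List.getElem_pyRange_one]
    rw [pv_dec_eq_point g hg]
    congr 1
    simp at h1 ⊢
    omega

-- Array.extract with Python-clamped bounds is exactly the Python slice of the underlying list
lemma pv_extract_eq_slice {α : Type} (xs : Array α) (m : Nat) (hm : m = xs.size) (a b : Int) :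
    (xs.extract (PySem.List.clampIdx m a) (PySem.List.clampIdx m b)).toList
    = PySem.List.slice xs.toList (some a) (some b) := by
  subst hm
  simp [PySem.List.slice]

-- the Array-built grid of port A is the corresponding List fold
lemma pv_arr_grid_toList (g : Int) :
    ((PySem.List.pyRange (-g) (g + 1) 1).foldl (fun grid dx =>
      (PySem.List.pyRange (-g) (g + 1) 1).foldl (fun grid dy =>
        (PySem.List.pyRange (-g) (g + 1) 1).foldl (fun grid dz =>
          grid.push [dx, dy, dz]) grid) grid) (#[] : Array (List Int))).toList =
    (PySem.List.pyRange (-g) (g + 1) 1).foldl (fun grid dx =>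
      (PySem.List.pyRange (-g) (g + 1) 1).foldl (fun grid dy =>
        (PySem.List.pyRange (-g) (g + 1) 1).foldl (fun grid dz =>
          grid ++ [[dx, dy, dz]]) grid) grid) ([] : List (List Int)) := by
  have h3 : ∀ (dx dy : Int) (a : Array (List Int)),
      (PySem.List.pyRange (-g) (g+1) 1).foldl (fun grid dz => grid ++ [[dx,dy,dz]]) a.toList
      = ((PySem.List.pyRange (-g) (g+1) 1).foldl (fun grid dz => grid.push [dx,dy,dz]) a).toList :=
    fun dx dy a => List.foldl_hom Array.toList (fun x y => by simp)
  have h2 : ∀ (dx : Int) (a : Array (List Int)),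
      (PySem.List.pyRange (-g) (g+1) 1).foldl (fun grid dy =>
        (PySem.List.pyRange (-g) (g+1) 1).foldl (fun grid dz => grid ++ [[dx,dy,dz]]) grid) a.toList
      = ((PySem.List.pyRange (-g) (g+1) 1).foldl (fun grid dy =>
        (PySem.List.pyRange (-g) (g+1) 1).foldl (fun grid dz => grid.push [dx,dy,dz]) grid) a).toList :=
    fun dx a => List.foldl_hom
      (g₁ := fun grid dy => (PySem.List.pyRange (-g) (g+1) 1).foldl (fun grid dz => grid.push [dx,dy,dz]) grid)
      (g₂ := fun grid dy => (PySem.List.pyRange (-g) (g+1) 1).foldl (fun grid dz => grid ++ [[dx,dy,dz]]) grid)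
      Array.toList (fun x y => h3 dx y x)
  have h1 := List.foldl_hom (l := PySem.List.pyRange (-g) (g+1) 1) (init := (#[] : Array (List Int)))
      (g₁ := fun grid dx => (PySem.List.pyRange (-g) (g+1) 1).foldl (fun grid dy =>
        (PySem.List.pyRange (-g) (g+1) 1).foldl (fun grid dz => grid.push [dx,dy,dz]) grid) grid)
      (g₂ := fun grid dx => (PySem.List.pyRange (-g) (g+1) 1).foldl (fun grid dy =>
        (PySem.List.pyRange (-g) (g+1) 1).foldl (fun grid dz => grid ++ [[dx,dy,dz]]) grid) grid)
      Array.toList (fun x y => h2 y x)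
  simpa using h1.symm

lemma pv_key (g n : Int) (hn : n ≠ 0) (G : Array (List Int))
    (hGL : G.toList = (List.range (pvS g * pvS g * pvS g)).map (pvDec g)) :
    ((PySem.List.pyRange 0 (G.size : Int) n).foldl (fun acc i =>
        acc.push (G.extract (PySem.List.clampIdx G.size i)
          (PySem.List.clampIdx G.size (i + n))).toList) #[]).toList
    = (PySem.List.pyRange 0 (if 2*g+1 > 0 then (2*g+1)^3 else 0) n).map (fun i =>
        (PySem.List.pyRange i (min (i + n) (if 2*g+1 > 0 then (2*g+1)^3 else 0)) 1).map (pvPointB g (2*g+1))) := by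
  have htot : (if 2 * g + 1 > 0 then (2 * g + 1) ^ 3 else 0)
      = ((pvS g * pvS g * pvS g : Nat) : Int) := by
    by_cases h : 2 * g + 1 > 0
    · simp only [h, if_true]
      have : (2 * g + 1) = ((pvS g : Nat) : Int) := by unfold pvS; omega
      rw [this]; push_cast; ring
    · simp only [h, if_false]
      have : pvS g = 0 := by unfold pvS; omega
      rw [this]; simp
  have hsize : G.size = pvS g * pvS g * pvS g := by
    rw [← Array.length_toList, hGL, List.length_map, List.length_range]
  have hfold := List.foldl_hom (l := PySem.List.pyRange 0 (G.size : Int) n)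
      (init := (#[] : Array (List (List Int))))
      (g₁ := fun acc i => acc.push (G.extract (PySem.List.clampIdx G.size i)
          (PySem.List.clampIdx G.size (i + n))).toList)
      (g₂ := fun acc i => acc ++ [(G.extract (PySem.List.clampIdx G.size i)
          (PySem.List.clampIdx G.size (i + n))).toList])
      Array.toList (fun x y => by simp)
  rw [← hfold]
  rw [PySem.List.foldl_append_singleton_eq_map, List.nil_append, htot, hsize]
  rcases lt_or_gt_of_ne hn with hneg | hpos
  · rw [pv_pyRange_neg_empty _ _ hneg]
    simp
  · apply List.map_congr_left
    intro i hi
    rw [PySem.List.mem_pyRange_iff_of_pos hpos] at hi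
    rw [pv_extract_eq_slice G _ hsize.symm, hGL]
    exact pv_chunk_eq g n i _ rfl hpos hi.1 hi.2.1

lemma pv_main (g n : Int) (hn : n ≠ 0) : get_grid_groups g n = get_grid_groups_alt g n := by
  simp only [get_grid_groups, get_grid_groups_alt]
  exact pv_key g n hn _ (by rw [pv_arr_grid_toList]; exact pv_grid_eq g)

-- ===== VERDICT (by name: the statement is the Claim_ definition above) =====
theorem get_grid_groups_spec : Claim_equal_get_grid_groups := by
  intro g n _ hn
  exact pv_main g n hn
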